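-- pv_equiv track=rewrite | github.com/niranjanreddy03/valutsentrynew | backend/app/scanner/entropy.py | _build_line_index
-- ===== SOURCE A (Python) =====
-- from typing import List, Tuple
--
-- def _build_line_index(content: str) -> List[int]:
--     """Offsets of every '\\n' in `content`. Used with bisect for O(log n) lookup."""
--     offsets = []
--     append = offsets.append
--     idx = content.find('\n')
--     while idx != -1:
--         append(idx)
--         idx = content.find('\n', idx + 1)
--     return offsets
-- ===== SOURCE B (Python) =====
-- def _build_line_index(content: str):
--     """Offsets of every '\n' in `content`, via split + prefix sums of piece lengths."""
--     pieces = content.split('\n')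
--     offsets = []
--     pos = 0
--     for piece in pieces[:-1]:
--         pos += len(piece)
--         offsets.append(pos)
--         pos += 1
--     return offsets
-- ===== Notes on version B (the rewrite author's own statement) =====
-- stated objective: alternative
-- what changed: Replaces the repeated str.find scanning loop with a two-phase computation: split the string once on the newline character, then recover each newline offset as a running prefix sum of the split pieces' lengths.
import Mathlib
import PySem

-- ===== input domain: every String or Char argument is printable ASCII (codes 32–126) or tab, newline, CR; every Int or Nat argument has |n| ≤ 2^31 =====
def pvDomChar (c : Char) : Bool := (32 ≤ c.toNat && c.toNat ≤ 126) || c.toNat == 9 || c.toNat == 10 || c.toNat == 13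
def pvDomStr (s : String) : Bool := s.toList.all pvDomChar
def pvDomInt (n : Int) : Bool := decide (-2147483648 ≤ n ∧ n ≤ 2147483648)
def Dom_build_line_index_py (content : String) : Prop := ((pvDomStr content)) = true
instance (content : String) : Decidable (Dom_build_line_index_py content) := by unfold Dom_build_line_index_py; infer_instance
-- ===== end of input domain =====

-- B replaces A's repeated str.find loop with a split('\n')-then-prefix-sum computation (alternative decomposition, same cost).

-- ===== PORT A =====
-- A's while-loop; fuel only makes it total (proved sufficient in the equivalence proof).
def buildGoA (s : List Char) (fuel : Nat) (idx : Int) (offsets : List Int) : List Int :=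
  match fuel with
  | 0 => offsets
  | f + 1 =>
    if idx = -1 then offsets
    else buildGoA s f (PySem.Chars.findFrom s ['\n'] (idx + 1) none) (offsets ++ [idx])

def build_line_index_py (content : String) : List Int :=
  buildGoA content.toList (content.toList.length + 1) (PySem.Chars.find content.toList ['\n']) []

-- ===== PORT B =====
-- the 'for piece in pieces[:-1]' loop of Source B, state = (pos, offsets)
def buildGoB : List (List Char) → Int → List Int → List Int
  | [], _, offsets => offsets
  | p :: ps, pos, offsets => buildGoB ps (pos + p.length + 1) (offsets ++ [pos + p.length])

def build_line_index_py_alt (content : String) : List Int :=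
  buildGoB (PySem.List.slice (PySem.Chars.splitOn content.toList ['\n']) none (some (-1))) 0 []

-- ===== PRECONDITION & SPEC =====
def Spec_build_line_index_py (content : String) (out : List Int) : Prop := out = build_line_index_py_alt content
instance (content : String) (out : List Int) : Decidable (Spec_build_line_index_py content out) := by unfold Spec_build_line_index_py; infer_instance

-- ===== CLAIM (what is proved, stated in full; the proofs are below) =====
def Claim_equal_build_line_index_py : Prop := ∀ (content : String), Dom_build_line_index_py content → Spec_build_line_index_py content (build_line_index_py content)

-- ===== LEMMAS AND PROOFS =====

-- newline offsets of l, positions counted from k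
def nlIdx : List Char → Int → List Int
  | [], _ => []
  | c :: cs, k => if c = '\n' then k :: nlIdx cs (k + 1) else nlIdx cs (k + 1)

theorem nlIdx_of_not_mem (l : List Char) (k : Int) (h : '\n' ∉ l) : nlIdx l k = [] := by
  induction l generalizing k with
  | nil => rfl
  | cons c cs ih =>
    simp only [List.mem_cons, not_or] at h
    simp [nlIdx, Ne.symm h.1, ih _ h.2]

theorem singleton_prefix_head? {a : Char} {l : List Char} : [a] <+: l ↔ l.head? = some a := by
  constructor
  · rintro ⟨t, rfl⟩; rfl
  · intro h
    cases l with
    | nil => simp at h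
    | cons b t => simp at h; exact ⟨t, by simp [h]⟩

theorem singleton_infix_mem {a : Char} {l : List Char} : [a] <:+: l ↔ a ∈ l := by
  constructor
  · intro h; exact h.sublist.subset (by simp)
  · intro h
    obtain ⟨s, t, rfl⟩ := List.append_of_mem h
    exact ⟨s, t, by simp⟩

theorem nlIdx_drop_step (gap : Nat) (s : List Char) (k m : Nat)
    (hgap : m - k = gap) (hkm : k ≤ m) (hm : m < s.length)
    (hmin : ∀ i, k ≤ i → i < m → ¬ (['\n'] <+: s.drop i))
    (hpre : ['\n'] <+: s.drop m) :
    nlIdx (s.drop k) (k : Int) = (m : Int) :: nlIdx (s.drop (m + 1)) ((m : Int) + 1) := by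
  induction gap generalizing k with
  | zero =>
    have hk : k = m := by omega
    subst hk
    have hget : s[k] = '\n' := by
      have := singleton_prefix_head?.mp hpre
      rw [List.head?_drop] at this
      simpa [List.getElem?_eq_getElem hm] using this
    rw [List.drop_eq_getElem_cons hm]
    simp [nlIdx, hget]
  | succ g ih =>
    have hklt : k < m := by omega
    have hks : k < s.length := by omega
    have hget : s[k] ≠ '\n' := by
      intro hc
      exact hmin k le_rfl hklt (singleton_prefix_head?.mpr (by
        rw [List.head?_drop]; simp [List.getElem?_eq_getElem hks, hc]))
    rw [List.drop_eq_getElem_cons hks]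
    simp only [nlIdx, if_neg hget]
    have := ih (k + 1) (by omega) (by omega)
      (fun i h1 h2 => hmin i (by omega) h2)
    push_cast at this ⊢
    exact this

theorem buildGoA_findFrom (fuel : Nat) (s : List Char) (k : Nat) (acc : List Int)
    (hk : k ≤ s.length) (hfuel : s.length - k < fuel) :
    buildGoA s fuel (PySem.Chars.findFrom s ['\n'] (k : Int) none) acc
      = acc ++ nlIdx (s.drop k) (k : Int) := by
  induction fuel generalizing k acc with
  | zero => omega
  | succ f ih =>
    by_cases hneg : PySem.Chars.findFrom s ['\n'] (k : Int) none = -1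
    · have hnomem : '\n' ∉ s.drop k := by
        have := (PySem.Chars.findFrom_natCast_eq_neg_one_iff s ['\n'] k hk).mp hneg
        exact fun hmem => this (singleton_infix_mem.mpr hmem)
      rw [hneg]
      simp [buildGoA, nlIdx_of_not_mem _ _ hnomem]
    · obtain ⟨hle, hpre, hmin⟩ := PySem.Chars.findFrom_natCast_spec s ['\n'] k hk hneg
      set r := PySem.Chars.findFrom s ['\n'] (k : Int) none with hr
      have h0r : (0 : Int) ≤ r := le_trans (by positivity) hle
      set m := r.toNat with hmdef
      have hrm : r = (m : Int) := by omega
      have hmlt : m < s.length := by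
        rcases hpre with ⟨t, ht⟩
        have : 0 < (s.drop m).length := by rw [← ht]; simp
        simp at this; omega
      have hkm : k ≤ m := by omega
      have step : buildGoA s (f + 1) r acc
          = buildGoA s f (PySem.Chars.findFrom s ['\n'] (r + 1) none) (acc ++ [r]) := by
        rw [buildGoA]; rw [if_neg hneg]
      rw [step, hrm]
      have hcast : ((m : Int) + 1) = ((m + 1 : Nat) : Int) := by push_cast; ring
      rw [hcast]
      rw [ih (m + 1) (acc ++ [(m : Int)]) (by omega) (by omega)]
      have hmin' : ∀ i, k ≤ i → i < m → ¬ (['\n'] <+: s.drop i) := by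
        intro i h1 h2
        exact hmin i (by exact_mod_cast h1) (by omega)
      rw [nlIdx_drop_step (m - k) s k m rfl hkm hmlt hmin' hpre, ← hcast]
      simp

-- structural version of splitting on '\n'
def spNl : List Char → List (List Char)
  | [] => [[]]
  | c :: rest =>
    match spNl rest with
    | [] => []
    | h :: t => if c = '\n' then [] :: h :: t else (c :: h) :: t

theorem spNl_ne_nil (l : List Char) : spNl l ≠ [] := by
  induction l with
  | nil => simp [spNl]
  | cons c rest ih =>
    cases h : spNl rest with
    | nil => exact absurd h ih
    | cons a b => by_cases hc : c = '\n' <;> simp [spNl, h, hc]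

theorem splitOn_go_eq (fuel : Nat) (l cur : List Char) (acc : List (List Char))
    (hfuel : l.length < fuel) :
    PySem.Chars.splitOn.go ['\n'] fuel l cur acc
      = acc.reverse ++ (cur.reverse ++ (spNl l).headI) :: (spNl l).tail := by
  induction fuel generalizing l cur acc with
  | zero => omega
  | succ f ih =>
    cases l with
    | nil => simp [PySem.Chars.splitOn.go, spNl]
    | cons c rest =>
      by_cases hc : c = '\n'
      · subst hc
        have hpref : List.isPrefixOf ['\n'] ('\n' :: rest) = true := by
          simp [List.isPrefixOf]
        rw [PySem.Chars.splitOn.go, hpref]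
        simp only [if_true, List.length_singleton, List.drop_one, List.tail_cons]
        rw [ih rest [] (cur.reverse :: acc) (by simp at hfuel; omega)]
        cases h : spNl rest with
        | nil => exact absurd h (spNl_ne_nil rest)
        | cons a b => simp [spNl, h]
      · have hpref : List.isPrefixOf ['\n'] (c :: rest) = false := by
          simp [List.isPrefixOf, Ne.symm hc]
        rw [PySem.Chars.splitOn.go, hpref]
        simp only [Bool.false_eq_true, if_false]
        rw [ih rest (c :: cur) acc (by simp at hfuel; omega)]
        cases h : spNl rest with
        | nil => exact absurd h (spNl_ne_nil rest)
        | cons a b => simp [spNl, h, hc]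

theorem splitOn_eq_spNl (l : List Char) :
    PySem.Chars.splitOn l ['\n'] = spNl l := by
  rw [PySem.Chars.splitOn, splitOn_go_eq _ _ _ _ (by omega)]
  cases h : spNl l with
  | nil => exact absurd h (spNl_ne_nil l)
  | cons a b => simp

theorem slice_neg_one {α : Type} (l : List α) :
    PySem.List.slice l none (some (-1)) = l.dropLast := by
  simp [PySem.List.slice, PySem.List.clampIdx, List.dropLast_eq_take]
  split_ifs with h
  · subst h; simp
  · have : 0 < l.length := List.length_pos_iff.mpr h
    omega

theorem buildGoB_spNl (l : List Char) (k : Int) (offs : List Int) :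
    buildGoB (spNl l).dropLast k offs = offs ++ nlIdx l k := by
  induction l generalizing k offs with
  | nil => simp [spNl, buildGoB, nlIdx]
  | cons c rest ih =>
    cases h : spNl rest with
    | nil => exact absurd h (spNl_ne_nil rest)
    | cons a b =>
      by_cases hc : c = '\n'
      · subst hc
        simp only [spNl, h, if_true]
        have hd : (([] : List Char) :: a :: b).dropLast = [] :: (a :: b).dropLast := by
          simp
        rw [hd]
        have := ih (k + 1) (offs ++ [k])
        rw [h] at this
        simpa [buildGoB, nlIdx] using this
      · simp only [spNl, h, if_neg hc]
        cases b with
        | nil =>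
          have := ih (k + 1) offs
          rw [h] at this
          simp only [List.dropLast, buildGoB] at this ⊢
          have hnl : nlIdx rest (k + 1) = [] := by
            have := this.symm
            simpa using this
          simp [nlIdx, hc, hnl]
        | cons b0 bs =>
          have hd : ((c :: a) :: b0 :: bs).dropLast = (c :: a) :: (b0 :: bs).dropLast := by
            simp
          rw [hd]
          have := ih (k + 1) offs
          rw [h] at this
          have hd2 : (a :: b0 :: bs).dropLast = a :: (b0 :: bs).dropLast := by simp
          rw [hd2] at this
          simp only [buildGoB] at this ⊢
          rw [nlIdx]
          simp only [if_neg hc]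
          rw [← this]
          congr 2
          · push_cast [List.length_cons]; ring
          · congr 1; push_cast [List.length_cons]; ring

-- ===== VERDICT (by name: the statement is the Claim_ definition above) =====
theorem build_line_index_py_spec : Claim_equal_build_line_index_py := by
  intro content _
  unfold Spec_build_line_index_py build_line_index_py build_line_index_py_alt
  rw [splitOn_eq_spNl, slice_neg_one, buildGoB_spNl]
  rw [← PySem.Chars.findFrom_zero content.toList ['\n']]
  have := buildGoA_findFrom (content.toList.length + 1) content.toList 0 []
    (by omega) (by omega)
  simpa using this
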